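-- pv_equiv track=rewrite | github.com/msobanShaukat/panaversity_AI-201-Fundamentals-of-Agentic-AI | deep_search_agent/my_deep_search_agent/report_writer.py | build_refs_map
-- ===== SOURCE A (Python) =====
-- def build_refs_map(results):
--     refs, count = {}, 1
--     for res in results or []:
--         for url in res.get("sources", []):
--             if url and url not in refs:
--                 refs[url] = count
--                 count += 1
--     return refs
-- ===== SOURCE B (Python) =====
-- def build_refs_map(results):
--     flat = [u for res in (results or []) for u in res.get("sources", []) if u]
--     # last write wins, so iterating in reverse leaves each url's FIRST index
--     first = {u: i for i, u in reversed(list(enumerate(flat)))}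
--     ordered = sorted(first, key=first.get)
--     return {u: n for n, u in enumerate(ordered, 1)}
-- ===== Notes on version B (the rewrite author's own statement) =====
-- stated objective: alternative
-- what changed: Instead of A's single pass with a membership test and a running counter, B flattens the non-empty URLs, records each URL's first-occurrence index by overwriting a dict built from the reversed enumeration (no membership test), sorts the distinct URLs by that index, and numbers the sorted list.
import Mathlib
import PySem

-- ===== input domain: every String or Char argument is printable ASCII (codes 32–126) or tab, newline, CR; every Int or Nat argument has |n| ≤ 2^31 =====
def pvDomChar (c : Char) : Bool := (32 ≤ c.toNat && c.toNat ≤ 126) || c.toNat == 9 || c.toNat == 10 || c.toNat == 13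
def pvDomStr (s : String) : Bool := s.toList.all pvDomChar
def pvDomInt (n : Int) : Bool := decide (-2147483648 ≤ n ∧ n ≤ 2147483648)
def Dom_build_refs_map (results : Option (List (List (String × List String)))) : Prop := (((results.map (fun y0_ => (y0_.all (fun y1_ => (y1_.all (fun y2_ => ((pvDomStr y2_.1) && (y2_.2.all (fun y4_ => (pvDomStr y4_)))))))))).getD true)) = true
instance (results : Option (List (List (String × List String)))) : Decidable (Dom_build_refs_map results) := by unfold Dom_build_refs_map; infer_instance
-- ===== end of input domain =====

-- B replaces A's single pass (membership test + running counter) by: flatten the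
-- non-empty URLs, record each URL's first index by overwriting a dict built from the
-- reversed enumeration, sort the distinct URLs by that index, number the sorted list.
-- Objective: alternative (no speed claim).

-- ===== PORT A =====
def build_refs_map (results : Option (List (List (String × List String)))) : List (String × Int) :=
  (((results.getD []).foldl
      (fun (st : PySem.Dict String Int × Int) res =>
        ((PySem.Dict.mk res).getD "sources" []).foldl
          (fun st url =>
            if url ≠ "" ∧ st.1.contains url = false then (st.1.insert url st.2, st.2 + 1)
            else st)
          st)
      (PySem.Dict.empty, 1)).1).items

-- ===== PORT B =====
def build_refs_map_alt (results : Option (List (List (String × List String)))) : List (String × Int) :=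
  let flat := (results.getD []).flatMap
    (fun res => ((PySem.Dict.mk res).getD "sources" []).filter (fun u => u ≠ ""))
  -- {u: i for i, u in reversed(list(enumerate(flat)))}
  let first := (PySem.List.enumerate flat 0).reverse.foldl
    (fun (d : PySem.Dict String Int) p => d.insert p.2 p.1) PySem.Dict.empty
  -- sorted(first, key=first.get); first.get u is always some for u in first's keys,
  -- ported as getD _ 0 (exact there)
  let ordered := PySem.List.sorted first.keys (fun u => first.getD u 0) false
  -- {u: n for n, u in enumerate(ordered, 1)}
  ((PySem.List.enumerate ordered 1).foldl
    (fun (d : PySem.Dict String Int) p => d.insert p.2 p.1) PySem.Dict.empty).items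

-- ===== PRECONDITION & SPEC =====
def Spec_build_refs_map (results : Option (List (List (String × List String)))) (out : List (String × Int)) : Prop := out = build_refs_map_alt results
instance (results : Option (List (List (String × List String)))) (out : List (String × Int)) : Decidable (Spec_build_refs_map results out) := by unfold Spec_build_refs_map; infer_instance

-- ===== CLAIM (what is proved, stated in full; the proofs are below) =====
def Claim_equal_build_refs_map : Prop := ∀ (results : Option (List (List (String × List String)))), Dom_build_refs_map results → Spec_build_refs_map results (build_refs_map results)

-- ===== LEMMAS AND PROOFS =====

-- ---- A side: the loop appends first-seen fresh urls numbered from the counter ----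

-- adding to a set that already holds u ignores later u's
lemma pv_foldl_add_filter (u : String) (xs : List String) : ∀ (s : PySem.Set String), u ∈ s →
    xs.foldl PySem.Set.add s = (xs.filter (fun x => !(x == u))).foldl PySem.Set.add s := by
  induction xs with
  | nil => intro s _; simp
  | cons x xs ih =>
    intro s hs
    by_cases hx : x = u
    · subst hx
      have hc : PySem.Set.add s x = s := by
        simp [PySem.Set.add, hs]
      simp only [List.foldl_cons, List.filter_cons, beq_self_eq_true, Bool.not_true,
        Bool.false_eq_true, if_false]
      rw [hc, ih s hs]
    · have hmem : u ∈ PySem.Set.add s x := (PySem.Set.mem_add s x u).mpr (Or.inl hs)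
      have hne : (x == u) = false := by simp [hx]
      simp only [List.foldl_cons, List.filter_cons, hne, Bool.not_false, if_pos]
      exact ih _ hmem

lemma pv_foldl_add_cons (a : String) (ys : List String) : ∀ (s : PySem.Set String),
    (∀ y ∈ ys, (y == a) = false) → ys.foldl PySem.Set.add (a :: s) = a :: ys.foldl PySem.Set.add s := by
  induction ys with
  | nil => intro s _; simp
  | cons y ys ih =>
    intro s h
    have hy : (y == a) = false := h y (by simp)
    have hadd : PySem.Set.add (a :: s) y = a :: PySem.Set.add s y := by
      have hcons : List.contains (a :: s) y = List.contains s y := by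
        have hne : y ≠ a := by simpa using hy
        simp
        exact fun he => absurd he hne
      simp only [PySem.Set.add, PySem.Set.contains, hcons]
      split <;> simp
    rw [List.foldl_cons, hadd, ih _ (fun z hz => h z (by simp [hz])), List.foldl_cons]

lemma pv_dedup_cons (u : String) (xs : List String) :
    PySem.List.dedup (u :: xs) = u :: PySem.List.dedup (xs.filter (fun x => !(x == u))) := by
  have h1 : PySem.List.dedup (u :: xs) = xs.foldl PySem.Set.add [u] := by
    rw [PySem.List.dedup_eq_ofList, PySem.Set.ofList_eq_foldl, List.foldl_cons]
    simp [PySem.Set.add]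
  have h2 : PySem.List.dedup (xs.filter (fun x => !(x == u)))
      = (xs.filter (fun x => !(x == u))).foldl PySem.Set.add [] := by
    rw [PySem.List.dedup_eq_ofList, PySem.Set.ofList_eq_foldl]
  rw [h1, h2, pv_foldl_add_filter u xs [u] (by simp)]
  exact pv_foldl_add_cons u _ [] (fun y hy => by simpa using (List.of_mem_filter hy))

-- the inner conditional step of A, with the empty-url test already discharged
def pvStep (st : PySem.Dict String Int × Int) (url : String) : PySem.Dict String Int × Int :=
  if st.1.contains url = false then (st.1.insert url st.2, st.2 + 1) else st

-- loop invariant: folding A's step appends exactly the first-seen fresh urls, numbered from c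
lemma pv_core (l : List String) : ∀ (d : PySem.Dict String Int) (c : Int),
    ((l.foldl pvStep (d, c)).1).items
      = d.items ++ (PySem.List.enumerate
          (PySem.List.dedup (l.filter (fun u => !(d.contains u)))) c).map (fun p => (p.2, p.1)) := by
  induction l with
  | nil => intro d c; simp
  | cons u l ih =>
    intro d c
    by_cases h : d.contains u = true
    · have hstep : pvStep (d, c) u = (d, c) := by simp [pvStep, h]
      simp only [List.foldl_cons, hstep, List.filter_cons, h, Bool.not_true,
        Bool.false_eq_true, if_false]
      exact ih d c
    · have h' : d.contains u = false := by simpa using h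
      have hstep : pvStep (d, c) u = (d.insert u c, c + 1) := by simp [pvStep, h']
      rw [List.foldl_cons, hstep, ih (d.insert u c) (c + 1)]
      have hfil : l.filter (fun x => !((d.insert u c).contains x))
          = (l.filter (fun x => !(d.contains x))).filter (fun x => !(x == u)) := by
        rw [List.filter_filter]
        apply List.filter_congr
        intro x _
        simp [PySem.Dict.contains_insert]
      rw [PySem.Dict.items_insert_of_not_contains _ _ h']
      rw [List.filter_cons_of_pos (by simp [h']), pv_dedup_cons, hfil]
      simp [PySem.List.enumerate_cons]

-- the whole of A's loop: items = first-seen distinct non-empty urls numbered from 1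
lemma pv_main (L : List (List (String × List String))) :
    ((L.foldl (fun (st : PySem.Dict String Int × Int) res =>
        ((PySem.Dict.mk res).getD "sources" []).foldl
          (fun st url =>
            if url ≠ "" ∧ st.1.contains url = false then (st.1.insert url st.2, st.2 + 1)
            else st) st)
      (PySem.Dict.empty, 1)).1).items
    = (PySem.List.enumerate (PySem.List.dedup (L.flatMap
        (fun res => ((PySem.Dict.mk res).getD "sources" []).filter (fun u => u ≠ "")))) 1).map
        (fun p => (p.2, p.1)) := by
  rw [← List.foldl_flatMap]
  rw [show (fun (st : PySem.Dict String Int × Int) url =>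
        if url ≠ "" ∧ st.1.contains url = false then (st.1.insert url st.2, st.2 + 1) else st)
      = (fun st url => if url ≠ "" then pvStep st url else st) from by
        funext st url
        by_cases hx : url = "" <;> simp [pvStep, hx]]
  rw [PySem.List.foldl_ite_eq_foldl_filter (p := fun u => u ≠ "") pvStep]
  rw [← List.filter_flatMap, pv_core]
  have hall : (((L.flatMap (fun res => (PySem.Dict.mk res).getD "sources" [])).filter
      (fun u => decide (u ≠ ""))).filter
        (fun u => !((PySem.Dict.empty : PySem.Dict String Int).contains u)))
      = ((L.flatMap (fun res => (PySem.Dict.mk res).getD "sources" [])).filter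
          (fun u => decide (u ≠ ""))) := by
    apply List.filter_eq_self.mpr
    intro a _
    simp [PySem.Dict.contains_empty]
  rw [hall]
  simp [PySem.Dict.empty]

-- ---- B side: the reversed-enumerate dict and the sort ----

-- the dict {u: i for i, u in reversed(list(enumerate(l, k)))}
def pvFirst (l : List String) (k : Int) : PySem.Dict String Int :=
  (PySem.List.enumerate l k).reverse.foldl
    (fun (d : PySem.Dict String Int) p => d.insert p.2 p.1) PySem.Dict.empty

lemma pvFirst_cons (u : String) (xs : List String) (k : Int) :
    pvFirst (u :: xs) k = (pvFirst xs (k + 1)).insert u k := by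
  simp [pvFirst, PySem.List.enumerate_cons, List.foldl_append]

-- every member of l is in the dict, with a value ≥ the start index
lemma pvFirst_get_mem (l : List String) : ∀ (k : Int) (x : String), x ∈ l →
    ∃ v, (pvFirst l k).get? x = some v ∧ k ≤ v := by
  induction l with
  | nil => intro _ x hx; cases hx
  | cons u xs ih =>
    intro k x hx
    rw [pvFirst_cons]
    by_cases hxu : x = u
    · subst hxu
      exact ⟨k, PySem.Dict.get?_insert_self _ _ _, le_refl k⟩
    · rcases List.mem_cons.mp hx with h | h
      · exact absurd h hxu
      · rcases ih (k + 1) x h with ⟨v, hv, hk⟩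
        exact ⟨v, by rw [PySem.Dict.get?_insert_of_ne _ _ hxu]; exact hv, by omega⟩

-- the keys of the dict are the distinct elements of l.reverse
lemma pvFirst_keys (l : List String) (k : Int) :
    (pvFirst l k).keys = PySem.Set.ofList l.reverse := by
  rw [pvFirst, PySem.Dict.keys_foldl_insert_key _ (fun p : Int × String => p.2)
    (fun _ p => p.1) PySem.Dict.empty]
  have : ((PySem.List.enumerate l k).reverse.map (fun p : Int × String => p.2)) = l.reverse := by
    rw [List.map_reverse, PySem.List.map_snd_enumerate]
  rw [this]
  have hke : (PySem.Dict.empty : PySem.Dict String Int).keys = [] := rfl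
  rw [hke, PySem.Set.update_nil_left]

-- dedup commutes with filter
lemma pv_dedup_filter (p : String → Bool) : ∀ (n : Nat) (l : List String), l.length ≤ n →
    PySem.List.dedup (l.filter p) = (PySem.List.dedup l).filter p := by
  intro n
  induction n with
  | zero => intro l hl; rw [List.length_eq_zero_iff.mp (Nat.le_zero.mp hl)]; simp
  | succ n ih =>
    intro l hl
    cases l with
    | nil => rfl
    | cons u xs =>
      have hlen : (xs.filter (fun x => !(x == u))).length ≤ n := by
        have := List.length_filter_le (fun x => !(x == u)) xs
        simp at hl; omega
      by_cases hu : p u = true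
      · rw [List.filter_cons_of_pos hu, pv_dedup_cons, pv_dedup_cons]
        rw [List.filter_cons_of_pos hu]
        have hcomm : (xs.filter p).filter (fun x => !(x == u))
            = (xs.filter (fun x => !(x == u))).filter p := by
          rw [List.filter_filter, List.filter_filter]
          apply List.filter_congr
          intro x _
          rw [Bool.and_comm]
        rw [hcomm, ih _ hlen]
      · have hu' : p u = false := by simpa using hu
        rw [List.filter_cons_of_neg (by simp [hu']), pv_dedup_cons,
          List.filter_cons_of_neg (by simp [hu']), ← ih _ hlen]
        congr 1
        rw [List.filter_filter]
        apply List.filter_congr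
        intro x _
        by_cases hpx : p x = true
        · have hxu : x ≠ u := fun he => by rw [he] at hpx; rw [hu'] at hpx; exact absurd hpx (by simp)
          simp [hpx, hxu]
        · have : p x = false := by simpa using hpx
          simp [this]

-- the first-occurrence indices strictly increase along dedup l
lemma pv_pairwise : ∀ (n : Nat) (l : List String) (k : Int), l.length ≤ n →
    (PySem.List.dedup l).Pairwise
      (fun a b => (pvFirst l k).getD a 0 < (pvFirst l k).getD b 0) := by
  intro n
  induction n with
  | zero =>
    intro l k hl
    rw [List.length_eq_zero_iff.mp (Nat.le_zero.mp hl)]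
    exact List.Pairwise.nil
  | succ n ih =>
    intro l k hl
    cases l with
    | nil => exact List.Pairwise.nil
    | cons u xs =>
      have hlen : (xs.filter (fun x => !(x == u))).length ≤ n := by
        have := List.length_filter_le (fun x => !(x == u)) xs
        simp at hl; omega
      rw [pv_dedup_cons]
      have hmemt : ∀ y ∈ PySem.List.dedup (xs.filter (fun x => !(x == u))),
          y ∈ xs ∧ y ≠ u := by
        intro y hy
        have hy' : y ∈ xs.filter (fun x => !(x == u)) := (PySem.List.mem_dedup _ _).mp hy
        refine ⟨List.mem_of_mem_filter hy', ?_⟩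
        have := List.of_mem_filter hy'
        simpa using this
      have hkey : ∀ y, y ≠ u → (pvFirst (u :: xs) k).getD y 0 = (pvFirst xs (k + 1)).getD y 0 := by
        intro y hy
        rw [pvFirst_cons, PySem.Dict.getD_insert_of_ne _ _ _ hy]
      constructor
      · intro y hy
        rcases hmemt y hy with ⟨hyx, hyu⟩
        rcases pvFirst_get_mem xs (k + 1) y hyx with ⟨v, hv, hkv⟩
        have hu0 : (pvFirst (u :: xs) k).getD u 0 = k := by
          rw [pvFirst_cons, PySem.Dict.getD_insert_self]
        rw [hu0, hkey y hyu, PySem.Dict.getD_of_get?_eq_some _ 0 hv]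
        omega
      · have hsub : (PySem.List.dedup (xs.filter (fun x => !(x == u)))).Sublist
            (PySem.List.dedup xs) := by
          rw [pv_dedup_filter _ xs.length xs (le_refl _)]
          exact List.filter_sublist
        have hpw := (ih xs (k + 1) (by simp at hl; omega)).sublist hsub
        refine hpw.imp_of_mem ?_
        intro a b ha hb hab
        rw [hkey a (hmemt a ha).2, hkey b (hmemt b hb).2]
        exact hab

-- sorting the dict's keys by first index recovers first-seen order
lemma pv_sorted (l : List String) :
    PySem.List.sorted ((pvFirst l 0).keys) (fun u => (pvFirst l 0).getD u 0) false
      = PySem.List.dedup l := by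
  apply PySem.List.sorted_eq_of_perm_of_pairwise_lt
  · rw [pvFirst_keys]
    apply (List.perm_ext_iff_of_nodup (PySem.List.nodup_dedup l) (PySem.Set.nodup_ofList _)).mpr
    intro x
    rw [PySem.List.mem_dedup, PySem.Set.mem_ofList, List.mem_reverse]
  · exact pv_pairwise l.length l 0 (le_refl _)

-- B's final comprehension over distinct keys appends each pair in order
lemma pv_final (l : List String) (h : l.Nodup) :
    ((PySem.List.enumerate l 1).foldl
      (fun (d : PySem.Dict String Int) p => d.insert p.2 p.1) PySem.Dict.empty).items
    = (PySem.List.enumerate l 1).map (fun p => (p.2, p.1)) := by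
  have hres := PySem.Dict.items_foldl_insert_fresh (PySem.List.enumerate l 1)
    (fun p : Int × String => p.2) (fun p : Int × String => p.1) PySem.Dict.empty
    (fun a _ => PySem.Dict.contains_empty _)
    (by rw [PySem.List.map_snd_enumerate]; exact h)
  simpa [PySem.Dict.empty] using hres

-- ===== VERDICT (by name: the statement is the Claim_ definition above) =====
theorem build_refs_map_spec : Claim_equal_build_refs_map := by
  intro results _
  show build_refs_map results = build_refs_map_alt results
  unfold build_refs_map build_refs_map_alt
  dsimp only
  rw [pv_main (results.getD [])]
  have hfirst : ((PySem.List.enumerate ((results.getD []).flatMap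
      (fun res => ((PySem.Dict.mk res).getD "sources" []).filter (fun u => u ≠ ""))) 0).reverse.foldl
      (fun (d : PySem.Dict String Int) p => d.insert p.2 p.1) PySem.Dict.empty)
      = pvFirst ((results.getD []).flatMap
        (fun res => ((PySem.Dict.mk res).getD "sources" []).filter (fun u => u ≠ ""))) 0 := rfl
  rw [hfirst, pv_sorted, pv_final _ (PySem.List.nodup_dedup _)]
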